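-- pv_equiv track=rewrite | github.com/unamfi/sistop-2026-1 | proyectos/2/CastañedaGonzalezAriana_EchevarriaAguilar/fiunamfs.py | find_contiguous_gap
-- ===== SOURCE A (Python) =====
-- def find_contiguous_gap(ranges, data_start, total_clusters, needed):
--     # search from data_start to total_clusters
--     cur = data_start
--     for (s,e) in ranges:
--         if cur + needed <= s:
--             return cur
--         cur = max(cur, e)
--     if cur + needed <= total_clusters:
--         return cur
--     return None
-- ===== SOURCE B (Python) =====
-- def find_contiguous_gap(ranges, data_start, total_clusters, needed):
--     # Divide-and-conquer: solve(rs, cur) recursively splits the range list in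
--     # half and returns either (True, answer) when a big-enough gap was found,
--     # or (False, frontier) with the merged frontier after consuming rs.
--     def solve(rs, cur):
--         if len(rs) == 0:
--             return (False, cur)
--         if len(rs) == 1:
--             s, e = rs[0]
--             if cur + needed <= s:
--                 return (True, cur)
--             return (False, max(cur, e))
--         m = len(rs) // 2
--         found, val = solve(rs[:m], cur)
--         if found:
--             return (True, val)
--         return solve(rs[m:], val)
--     found, val = solve(ranges, data_start)
--     if found:
--         return val
--     if val + needed <= total_clusters:
--         return val
--     return None
-- ===== Notes on version B (the rewrite author's own statement) =====
-- stated objective: alternative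
-- what changed: B replaces A's single left-to-right early-return loop by a divide-and-conquer recursion: it splits the range list in half, solves each half to an Either-style result (found answer, or merged frontier), and composes the halves; correctness rests on the compositionality of the frontier scan over list concatenation.
import Mathlib
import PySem

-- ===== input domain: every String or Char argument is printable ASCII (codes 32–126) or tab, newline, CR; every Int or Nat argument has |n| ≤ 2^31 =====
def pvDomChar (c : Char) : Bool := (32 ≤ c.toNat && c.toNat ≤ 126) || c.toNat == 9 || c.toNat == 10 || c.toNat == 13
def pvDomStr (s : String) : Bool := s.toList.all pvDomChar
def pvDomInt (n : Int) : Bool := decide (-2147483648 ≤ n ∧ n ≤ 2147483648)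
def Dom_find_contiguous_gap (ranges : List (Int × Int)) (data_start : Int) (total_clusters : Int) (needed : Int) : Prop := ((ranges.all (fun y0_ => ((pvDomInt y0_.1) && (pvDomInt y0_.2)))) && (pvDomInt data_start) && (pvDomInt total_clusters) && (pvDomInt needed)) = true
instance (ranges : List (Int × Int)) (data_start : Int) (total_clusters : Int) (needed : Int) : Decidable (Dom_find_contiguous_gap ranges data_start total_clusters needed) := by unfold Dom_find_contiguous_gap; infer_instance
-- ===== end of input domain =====

-- B replaces A's left-to-right early-return loop by a divide-and-conquer recursion on list halves; same values everywhere.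

-- ===== PORT A =====
-- A's loop: early return when cur + needed <= s, otherwise merge the frontier with max.
def goA : List (Int × Int) → Int → Int → Int → Option Int
  | [], cur, total_clusters, needed =>
      if cur + needed ≤ total_clusters then some cur else none
  | (s, e) :: rest, cur, total_clusters, needed =>
      if cur + needed ≤ s then some cur
      else goA rest (max cur e) total_clusters needed

def find_contiguous_gap (ranges : List (Int × Int)) (data_start : Int) (total_clusters : Int) (needed : Int) : Option Int :=
  goA ranges data_start total_clusters needed

-- ===== PORT B =====
-- Source B's solve: split the list in half, solve each half; (true, answer) or (false, frontier).
def solveB (needed : Int) : List (Int × Int) → Int → Bool × Int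
  | [], cur => (false, cur)
  | [(s, e)], cur =>
      if cur + needed ≤ s then (true, cur) else (false, max cur e)
  | p :: q :: rest, cur =>
      let l := p :: q :: rest
      let m := l.length / 2
      let r := solveB needed (l.take m) cur
      if r.1 then (true, r.2) else solveB needed (l.drop m) r.2
  termination_by l => l.length
  decreasing_by
  · simp [List.length_take]; omega
  · simp [List.length_drop]; omega

def find_contiguous_gap_alt (ranges : List (Int × Int)) (data_start : Int) (total_clusters : Int) (needed : Int) : Option Int :=
  let r := solveB needed ranges data_start
  if r.1 then some r.2
  else if r.2 + needed ≤ total_clusters then some r.2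
  else none

-- ===== PRECONDITION & SPEC =====
def Spec_find_contiguous_gap (ranges : List (Int × Int)) (data_start : Int) (total_clusters : Int) (needed : Int) (out : Option Int) : Prop := out = find_contiguous_gap_alt ranges data_start total_clusters needed
instance (ranges : List (Int × Int)) (data_start : Int) (total_clusters : Int) (needed : Int) (out : Option Int) : Decidable (Spec_find_contiguous_gap ranges data_start total_clusters needed out) := by unfold Spec_find_contiguous_gap; infer_instance

-- ===== CLAIM =====
def Claim_equal_find_contiguous_gap : Prop := ∀ (ranges : List (Int × Int)) (data_start : Int) (total_clusters : Int) (needed : Int), Dom_find_contiguous_gap ranges data_start total_clusters needed → Spec_find_contiguous_gap ranges data_start total_clusters needed (find_contiguous_gap ranges data_start total_clusters needed)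

-- ===== LEMMAS AND PROOFS =====
-- Linear reference scan: A's loop without the trailing total_clusters check.
def scanA (needed : Int) : List (Int × Int) → Int → Bool × Int
  | [], cur => (false, cur)
  | (s, e) :: rest, cur =>
      if cur + needed ≤ s then (true, cur) else scanA needed rest (max cur e)

theorem scanA_append (needed : Int) (l1 l2 : List (Int × Int)) (cur : Int) :
    scanA needed (l1 ++ l2) cur =
      (let r := scanA needed l1 cur; if r.1 then (true, r.2) else scanA needed l2 r.2) := by
  induction l1 generalizing cur with
  | nil => simp [scanA]
  | cons p rest ih =>
      obtain ⟨s, e⟩ := p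
      simp only [List.cons_append, scanA]
      by_cases h : cur + needed ≤ s
      · simp [h]
      · simp [h, ih]

theorem solveB_eq_scanA (needed : Int) (l : List (Int × Int)) (cur : Int) :
    solveB needed l cur = scanA needed l cur := by
  induction l, cur using solveB.induct needed with
  | case1 cur => simp [solveB, scanA]
  | case2 s e cur h => simp [solveB, scanA, h]
  | case3 s e cur h => simp [solveB, scanA, h]
  | case4 p q rest cur lv mv rv h ih1 =>
      simp only [solveB]
      simp only [rv, mv, lv] at h ih1
      rw [ih1] at h
      conv_rhs => rw [← List.take_append_drop ((p :: q :: rest).length / 2) (p :: q :: rest),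
        scanA_append]
      simp only [List.length_cons] at h ih1 ⊢
      rw [ih1]
      simp [h]
  | case5 p q rest cur lv mv rv h ih3 ih2 ih1 =>
      simp only [solveB]
      simp only [rv, mv, lv] at h ih3 ih1
      rw [ih3] at h ih1
      conv_rhs => rw [← List.take_append_drop ((p :: q :: rest).length / 2) (p :: q :: rest),
        scanA_append]
      simp only [List.length_cons] at h ih3 ih1 ⊢
      rw [ih3]
      simp [h, ih1]

theorem goA_eq_scanA (ranges : List (Int × Int)) (cur total_clusters needed : Int) :
    goA ranges cur total_clusters needed =
      (let r := scanA needed ranges cur;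
       if r.1 then some r.2 else if r.2 + needed ≤ total_clusters then some r.2 else none) := by
  induction ranges generalizing cur with
  | nil => simp [goA, scanA]
  | cons p rest ih =>
      obtain ⟨s, e⟩ := p
      simp only [goA, scanA]
      by_cases h : cur + needed ≤ s
      · simp [h]
      · simp [h, ih]

-- ===== VERDICT =====
theorem find_contiguous_gap_spec : Claim_equal_find_contiguous_gap := by
  intro ranges data_start total_clusters needed _
  unfold Spec_find_contiguous_gap find_contiguous_gap find_contiguous_gap_alt
  rw [goA_eq_scanA, solveB_eq_scanA]
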